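-- pv_equiv track=rewrite | github.com/ac2dia/Learn-Algorithms | 우테코/2021/1/__init__.py | solution
-- ===== SOURCE A (Python) =====
-- def solution(arr):
--     answer = []
--
--     counts = []
--     for i in range(1, 4):
--         counts.append(arr.count(i))
--
--     max_count = max(counts)
--
--     for count in counts:
--         answer.append(max_count - count)
--
--     return answer
-- ===== SOURCE B (Python) =====
-- def solution(arr):
--     # Sort once, then locate the boundaries of the runs of 1, 2, 3 by binary search:
--     # count of k in arr == bl(k+1) - bl(k) on the sorted copy.
--     s = sorted(arr)
--
--     def bl(x):
--         # index of the first element >= x in s (hand-written bisect_left)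
--         lo, hi = 0, len(s)
--         while lo < hi:
--             mid = (lo + hi) // 2
--             if s[mid] < x:
--                 lo = mid + 1
--             else:
--                 hi = mid
--         return lo
--
--     b = [bl(k) for k in (1, 2, 3, 4)]
--     counts = [b[i + 1] - b[i] for i in range(3)]
--     m = max(counts)
--     return [m - c for c in counts]
-- ===== Notes on version B (the rewrite author's own statement) =====
-- stated objective: alternative
-- what changed: B sorts the array once and finds each of the counts of 1, 2, 3 as the difference of two hand-written binary-search boundaries (bisect_left for k and k+1) on the sorted copy, instead of A's three linear arr.count scans; the answer is then the same max-count differences.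
import Mathlib
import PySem

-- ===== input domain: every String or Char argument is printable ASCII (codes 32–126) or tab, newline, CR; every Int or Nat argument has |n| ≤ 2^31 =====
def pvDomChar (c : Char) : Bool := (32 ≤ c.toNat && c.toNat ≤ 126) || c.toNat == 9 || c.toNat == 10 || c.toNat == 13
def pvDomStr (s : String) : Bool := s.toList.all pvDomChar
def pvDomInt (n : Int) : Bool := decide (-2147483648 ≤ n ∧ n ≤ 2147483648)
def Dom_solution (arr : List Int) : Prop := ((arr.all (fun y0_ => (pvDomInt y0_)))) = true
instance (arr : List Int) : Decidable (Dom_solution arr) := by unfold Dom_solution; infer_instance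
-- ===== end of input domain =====

-- B sorts once and obtains each count of 1,2,3 as the difference of two hand-written
-- binary-search boundaries on the sorted copy, instead of A's three linear arr.count scans;
-- objective: alternative algorithm.

-- ===== PORT A =====
def solution (arr : List Int) : List Int :=
  let counts := (PySem.List.pyRange 1 4 1).foldl
    (fun acc i => acc ++ [(PySem.List.count arr i : Int)]) []
  -- max(counts): counts always has 3 elements, so the nonempty case is the one Python takes
  let max_count := match PySem.List.max? counts (fun y => y) with
    | some m => m
    | none => 0
  counts.foldl (fun ans c => ans ++ [max_count - c]) []

-- ===== PORT B =====
-- hand-written bisect_left loop of Source B; the while-loop becomes recursion on hi - lo.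
-- s[mid] is in range whenever lo < hi ≤ s.length, so List.getD mid 0 is exact there.
def blAux (s : List Int) (x : Int) (lo hi : Nat) : Nat :=
  if lo < hi then
    let mid := (lo + hi) / 2
    if s.getD mid 0 < x then blAux s x (mid + 1) hi else blAux s x lo mid
  else lo
termination_by hi - lo
decreasing_by all_goals omega

def bl (s : List Int) (x : Int) : Nat := blAux s x 0 s.length

def solution_alt (arr : List Int) : List Int :=
  let s := PySem.List.sorted arr (fun y => y) false
  let b := [(1 : Int), 2, 3, 4].map (fun k => bl s k)
  let counts := (List.range 3).map (fun i => (b.getD (i + 1) 0 : Int) - (b.getD i 0 : Int))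
  let m := match PySem.List.max? counts (fun y => y) with
    | some m => m
    | none => 0
  counts.map (fun c => m - c)

-- ===== PRECONDITION & SPEC =====
def Spec_solution (arr : List Int) (out : List Int) : Prop := out = solution_alt arr
instance (arr : List Int) (out : List Int) : Decidable (Spec_solution arr out) := by unfold Spec_solution; infer_instance

-- ===== CLAIM (what is proved, stated in full; the proofs are below) =====
def Claim_equal_solution : Prop := ∀ (arr : List Int), Dom_solution arr → Spec_solution arr (solution arr)

-- ===== LEMMAS AND PROOFS =====

-- binary search on a (≤-sorted) list lands at the boundary: everything left is < x,
-- everything from the result on is ≥ x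
theorem blAux_spec (s : List Int) (x : Int) (lo hi : Nat)
    (hs : ∀ i j : Nat, i ≤ j → j < s.length → s.getD i 0 ≤ s.getD j 0)
    (hhi : hi ≤ s.length) (hlh : lo ≤ hi)
    (Hlo : ∀ i : Nat, i < lo → s.getD i 0 < x)
    (Hhi : ∀ i : Nat, hi ≤ i → i < s.length → x ≤ s.getD i 0) :
    blAux s x lo hi ≤ s.length ∧
    (∀ i : Nat, i < blAux s x lo hi → s.getD i 0 < x) ∧
    (∀ i : Nat, blAux s x lo hi ≤ i → i < s.length → x ≤ s.getD i 0) := by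
  rw [blAux]
  by_cases h : lo < hi
  · simp only [h, if_true]
    by_cases hm : s.getD ((lo + hi) / 2) 0 < x
    · simp only [hm, if_true]
      exact blAux_spec s x ((lo + hi) / 2 + 1) hi hs hhi (by omega)
        (fun i hi' => lt_of_le_of_lt (hs i ((lo + hi) / 2) (by omega) (by omega)) hm) Hhi
    · simp only [hm, if_false]
      exact blAux_spec s x lo ((lo + hi) / 2) hs (by omega) (by omega) Hlo
        (fun i hi1 hi2 => le_trans (not_lt.mp hm) (hs ((lo + hi) / 2) i hi1 hi2))
  · simp only [h, if_false]
    exact ⟨by omega, fun i hi' => Hlo i (by omega), fun i hi1 hi2 => Hhi i (by omega) hi2⟩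
termination_by hi - lo
decreasing_by all_goals omega

-- a predicate true exactly on the first r positions is counted r times
theorem countP_of_prefix (p : Int → Bool) (s : List Int) (r : Nat) (hr : r ≤ s.length)
    (h : ∀ i : Nat, i < s.length → (p (s.getD i 0) = true ↔ i < r)) : s.countP p = r := by
  induction s generalizing r with
  | nil =>
    simp only [List.length_nil, Nat.le_zero] at hr
    simp [hr]
  | cons a t ih =>
    cases r with
    | zero =>
      have ha : p a = false := by
        have := h 0 (by simp)
        simpa using (fun hpa => Nat.lt_irrefl 0 ((this).mp hpa))
      have ht := ih 0 (by omega) (fun i hi' => by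
        have h2 := h (i + 1) (by simpa using Nat.succ_lt_succ hi')
        rw [List.getD_cons_succ] at h2
        exact ⟨fun hp => absurd (h2.mp hp) (by omega), fun hlt => absurd hlt (by omega)⟩)
      simp [ha, ht]
    | succ r' =>
      have ha : p a = true := by
        have := h 0 (by simp)
        exact this.mpr (Nat.succ_pos r')
      have ht := ih r' (by simpa using Nat.le_of_succ_le_succ hr) (fun i hi' => by
        have h2 := h (i + 1) (by simpa using Nat.succ_lt_succ hi')
        rw [List.getD_cons_succ] at h2
        simpa [Nat.succ_lt_succ_iff] using h2)
      simp [ha, ht]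

-- bl on the sorted list counts the elements below x
theorem bl_eq_countP (s : List Int) (x : Int)
    (hs : List.Pairwise (fun a b : Int => a ≤ b) s) :
    bl s x = s.countP (fun y => decide (y < x)) := by
  have hmono : ∀ i j : Nat, i ≤ j → j < s.length → s.getD i 0 ≤ s.getD j 0 := by
    intro i j hij hj
    rcases Nat.eq_or_lt_of_le hij with rfl | hlt
    · exact le_refl _
    · rw [List.getD_eq_getElem s 0 (by omega), List.getD_eq_getElem s 0 hj]
      exact List.pairwise_iff_getElem.mp hs i j (by omega) hj hlt
  obtain ⟨h1, h2, h3⟩ := blAux_spec s x 0 s.length hmono (le_refl _) (Nat.zero_le _)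
    (fun i hi' => absurd hi' (Nat.not_lt_zero i)) (fun i hi1 hi2 => absurd hi2 (by omega))
  rw [bl] at *
  symm
  apply countP_of_prefix _ _ _ h1
  intro i hi'
  constructor
  · intro hp
    by_contra hge
    exact absurd (h3 i (by omega) hi') (by simpa using hp)
  · intro hlt
    simpa using h2 i hlt

-- counting below x+1 = counting below x plus the multiplicity of x
theorem countP_lt_succ (s : List Int) (x : Int) :
    s.countP (fun y => decide (y < x + 1)) =
    s.countP (fun y => decide (y < x)) + s.count x := by
  induction s with
  | nil => simp
  | cons a t ih =>
    rw [List.countP_cons, List.countP_cons, List.count_cons, ih]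
    simp only [decide_eq_true_eq, beq_iff_eq]
    split_ifs <;> omega

theorem count_sorted (arr : List Int) (v : Int) :
    (PySem.List.sorted arr (fun y => y) false).count v = arr.count v := by
  exact (PySem.List.sorted_perm arr (fun y => y) false).count_eq v

theorem bl_succ_sub (arr : List Int) (k : Int) :
    (bl (PySem.List.sorted arr (fun y => y) false) (k + 1) : Int) -
    (bl (PySem.List.sorted arr (fun y => y) false) k : Int) = (arr.count k : Int) := by
  have hp : List.Pairwise (fun a b : Int => a ≤ b) (PySem.List.sorted arr (fun y => y) false) :=
    PySem.List.sorted_pairwise arr (fun y => y)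
  rw [bl_eq_countP _ _ hp, bl_eq_countP _ _ hp, countP_lt_succ, count_sorted]
  push_cast
  ring

-- ===== VERDICT (by name: the statement is the Claim_ definition above) =====
theorem solution_spec : Claim_equal_solution := by
  intro arr _
  unfold Spec_solution solution solution_alt
  have hr : PySem.List.pyRange 1 4 1 = [1, 2, 3] := by decide
  have h1 := bl_succ_sub arr 1
  have h2 := bl_succ_sub arr 2
  have h3 := bl_succ_sub arr 3
  norm_num at h1 h2 h3
  simp only [hr, List.range_succ, List.range_zero, List.nil_append,
    List.map_cons, List.map_nil, List.cons_append, List.foldl, PySem.List.count_eq,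
    List.getD, List.getElem?_cons_zero, List.getElem?_cons_succ, Option.getD_some]
  rw [h1, h2, h3]
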